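-- pv_equiv track=rewrite | github.com/Sanidhya1398/uw-decision-support | ml-service/app/training/feature_engineering.py | extract_family_history_flags
-- ===== SOURCE A (Python) =====
-- from typing import Dict, List, Any, Optional
--
-- def extract_family_history_flags(disclosures: List[Dict[str, Any]]) -> Dict[str, bool]:
--     """Extract boolean flags for family history conditions."""
--     family_text = " ".join([
--         d.get("family_condition", "").lower()
--         for d in disclosures
--         if d.get("disclosure_type") == "family_history"
--     ])
--
--     return {
--         "family_history_cardiac": any(kw in family_text for kw in ["cardiac", "heart", "coronary"]),
--         "family_history_diabetes": "diabetes" in family_text,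
--         "family_history_cancer": any(kw in family_text for kw in ["cancer", "malignant"]),
--         "family_history_stroke": "stroke" in family_text,
--     }
-- ===== SOURCE B (Python) =====
-- def extract_family_history_flags(disclosures):
--     """Single streaming pass: OR-accumulate the four flags per disclosure."""
--     cardiac = diabetes = cancer = stroke = False
--     for d in disclosures:
--         if d.get("disclosure_type") != "family_history":
--             continue
--         t = d.get("family_condition", "").lower()
--         cardiac = cardiac or "cardiac" in t or "heart" in t or "coronary" in t
--         diabetes = diabetes or "diabetes" in t
--         cancer = cancer or "cancer" in t or "malignant" in t
--         stroke = stroke or "stroke" in t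
--     return {
--         "family_history_cardiac": cardiac,
--         "family_history_diabetes": diabetes,
--         "family_history_cancer": cancer,
--         "family_history_stroke": stroke,
--     }
-- ===== Notes on version B (the rewrite author's own statement) =====
-- stated objective: alternative
-- what changed: Replaces A's build-one-joined-string-then-scan strategy with a single streaming pass that OR-accumulates the four boolean flags per matching disclosure, never materialising the concatenated text.
import Mathlib
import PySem

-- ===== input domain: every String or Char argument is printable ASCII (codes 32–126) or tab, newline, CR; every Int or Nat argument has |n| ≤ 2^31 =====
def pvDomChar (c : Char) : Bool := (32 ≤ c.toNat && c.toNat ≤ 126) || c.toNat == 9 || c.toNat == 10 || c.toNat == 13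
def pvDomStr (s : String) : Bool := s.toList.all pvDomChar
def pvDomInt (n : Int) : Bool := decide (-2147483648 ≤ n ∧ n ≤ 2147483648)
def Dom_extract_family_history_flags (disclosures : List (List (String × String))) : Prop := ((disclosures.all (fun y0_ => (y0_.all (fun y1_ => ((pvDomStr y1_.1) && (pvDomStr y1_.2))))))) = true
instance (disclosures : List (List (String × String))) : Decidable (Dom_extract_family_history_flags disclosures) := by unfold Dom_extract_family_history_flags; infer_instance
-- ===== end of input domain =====

-- B replaces A's join-all-matching-text-then-scan strategy by a single streaming pass
-- that OR-accumulates the four flags per matching disclosure (alternative decomposition, same cost).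


-- ===== PORT A =====
def extract_family_history_flags (disclosures : List (List (String × String))) : List (String × Bool) :=
  let family_text := PySem.Str.join " "
    ((disclosures.filter
        (fun d => PySem.Dict.get? (PySem.Dict.mk d) "disclosure_type" == some "family_history")).map
      (fun d => PySem.Str.lower (PySem.Dict.getD (PySem.Dict.mk d) "family_condition" "")))
  [("family_history_cardiac",
      (["cardiac", "heart", "coronary"]).any (fun kw => PySem.Str.isIn kw family_text)),
   ("family_history_diabetes", PySem.Str.isIn "diabetes" family_text),
   ("family_history_cancer",
      (["cancer", "malignant"]).any (fun kw => PySem.Str.isIn kw family_text)),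
   ("family_history_stroke", PySem.Str.isIn "stroke" family_text)]

-- ===== PORT B =====
-- one step of B's loop: skip non-family_history disclosures, else OR-update the four flags
def fhUpdate (st : Bool × Bool × Bool × Bool) (d : List (String × String)) : Bool × Bool × Bool × Bool :=
  if PySem.Dict.get? (PySem.Dict.mk d) "disclosure_type" == some "family_history" then
    let t := PySem.Str.lower (PySem.Dict.getD (PySem.Dict.mk d) "family_condition" "")
    (st.1 || PySem.Str.isIn "cardiac" t || PySem.Str.isIn "heart" t || PySem.Str.isIn "coronary" t,
     st.2.1 || PySem.Str.isIn "diabetes" t,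
     st.2.2.1 || PySem.Str.isIn "cancer" t || PySem.Str.isIn "malignant" t,
     st.2.2.2 || PySem.Str.isIn "stroke" t)
  else st

def extract_family_history_flags_alt (disclosures : List (List (String × String))) : List (String × Bool) :=
  let st := disclosures.foldl fhUpdate (false, false, false, false)
  [("family_history_cardiac", st.1),
   ("family_history_diabetes", st.2.1),
   ("family_history_cancer", st.2.2.1),
   ("family_history_stroke", st.2.2.2)]

-- ===== PRECONDITION & SPEC =====
def Spec_extract_family_history_flags (disclosures : List (List (String × String))) (out : List (String × Bool)) : Prop := out = extract_family_history_flags_alt disclosures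
instance (disclosures : List (List (String × String))) (out : List (String × Bool)) : Decidable (Spec_extract_family_history_flags disclosures out) := by unfold Spec_extract_family_history_flags; infer_instance

-- ===== CLAIM (what is proved, stated in full; the proofs are below) =====
def Claim_equal_extract_family_history_flags : Prop := ∀ (disclosures : List (List (String × String))), Dom_extract_family_history_flags disclosures → Spec_extract_family_history_flags disclosures (extract_family_history_flags disclosures)

-- ===== LEMMAS AND PROOFS =====

-- a prefix of a ++ c :: b that avoids c is a prefix of a
theorem fh_prefix_split {kw a b : List Char} {c : Char} (hc : c ∉ kw)
    (h : kw <+: a ++ c :: b) : kw <+: a := by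
  by_cases hlen : kw.length ≤ a.length
  · have hk : kw = (a ++ c :: b).take kw.length := by
      rcases h with ⟨t, ht⟩
      rw [← ht, List.take_append_of_le_length (by simp)]
      simp
    rw [hk, List.take_append_of_le_length hlen]
    exact List.take_prefix _ _
  · exfalso
    have hlt : a.length < kw.length := by omega
    have h2 := h.getElem (i := a.length) hlt
    simp at h2
    exact hc (h2 ▸ List.getElem_mem _)

-- an infix of a ++ c :: b that avoids c lies entirely in a or in b
theorem fh_infix_split {kw : List Char} {c : Char} (hc : c ∉ kw) :
    ∀ a b : List Char, (kw <:+: a ++ c :: b ↔ kw <:+: a ∨ kw <:+: b) := by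
  intro a
  induction a with
  | nil =>
    intro b
    constructor
    · intro h
      rcases List.infix_cons_iff.1 h with hp | hi
      · match kw, hp with
        | [], _ => exact Or.inl List.nil_infix
        | x :: kw', hp =>
          have hx : x = c := (List.cons_prefix_cons.1 hp).1
          exact absurd (hx ▸ List.mem_cons_self) hc
      · exact Or.inr hi
    · rintro (h | h)
      · have : kw = [] := List.eq_nil_of_infix_nil h
        simp [this]
      · exact h.trans ((List.suffix_cons c b).isInfix)
  | cons x a' ih =>
    intro b
    constructor
    · intro h
      rcases List.infix_cons_iff.1 h with hp | hi
      · have : kw <+: (x :: a') ++ c :: b := by simpa using hp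
        exact Or.inl (fh_prefix_split hc this).isInfix
      · rcases (ih b).1 hi with h' | h'
        · exact Or.inl (h'.trans (List.suffix_cons x a').isInfix)
        · exact Or.inr h'
    · rintro (h | h)
      · exact h.trans ((x :: a').prefix_append (c :: b)).isInfix
      · exact h.trans (((List.suffix_cons c b).trans (List.suffix_append (x :: a') (c :: b))).isInfix)

-- a nonempty keyword avoiding the separator occurs in the joined text iff it occurs in some part
theorem fh_infix_join {kw : List Char} {c : Char} (hne : kw ≠ []) (hc : c ∉ kw) :
    ∀ l : List (List Char), (kw <:+: PySem.Chars.join [c] l ↔ ∃ p ∈ l, kw <:+: p) := by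
  intro l
  induction l with
  | nil =>
    simp only [PySem.Chars.join_nil, List.not_mem_nil]
    constructor
    · intro h; exact absurd (List.eq_nil_of_infix_nil h) hne
    · rintro ⟨p, hp, _⟩; exact absurd hp (by simp)
  | cons p rest ih =>
    cases rest with
    | nil => simp [PySem.Chars.join_singleton]
    | cons q r =>
      rw [PySem.Chars.join_cons_cons]
      have harr : p ++ [c] ++ PySem.Chars.join [c] (q :: r) = p ++ c :: PySem.Chars.join [c] (q :: r) := by
        simp
      rw [harr, fh_infix_split hc, ih]
      simp

-- string level: "kw in ' '.join(parts)" equals "any(kw in p for p in parts)"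
theorem fh_isIn_join (kw : String) (parts : List String) (hne : kw.toList ≠ [])
    (hc : ' ' ∉ kw.toList) :
    PySem.Str.isIn kw (PySem.Str.join " " parts) = parts.any (fun p => PySem.Str.isIn kw p) := by
  apply Bool.eq_iff_iff.2
  rw [PySem.Str.isIn_iff_infix, PySem.Str.toList_join]
  have hsep : (" " : String).toList = [' '] := rfl
  rw [hsep, fh_infix_join hne hc]
  simp [List.any_eq_true, PySem.Chars.isIn_iff_infix]

-- the parts A joins (lowered conditions of family_history disclosures)
def fhParts (ds : List (List (String × String))) : List String :=
  (ds.filter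
      (fun d => PySem.Dict.get? (PySem.Dict.mk d) "disclosure_type" == some "family_history")).map
    (fun d => PySem.Str.lower (PySem.Dict.getD (PySem.Dict.mk d) "family_condition" ""))

def fhG1 (t : String) : Bool :=
  PySem.Str.isIn "cardiac" t || PySem.Str.isIn "heart" t || PySem.Str.isIn "coronary" t
def fhG2 (t : String) : Bool := PySem.Str.isIn "diabetes" t
def fhG3 (t : String) : Bool := PySem.Str.isIn "cancer" t || PySem.Str.isIn "malignant" t
def fhG4 (t : String) : Bool := PySem.Str.isIn "stroke" t

-- B's fold computes, in each component, the OR of the initial flag with an 'any' over the parts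
theorem fh_foldl (ds : List (List (String × String))) :
    ∀ st : Bool × Bool × Bool × Bool,
      ds.foldl fhUpdate st =
        (st.1 || (fhParts ds).any fhG1, st.2.1 || (fhParts ds).any fhG2,
         st.2.2.1 || (fhParts ds).any fhG3, st.2.2.2 || (fhParts ds).any fhG4) := by
  induction ds with
  | nil => intro st; simp [fhParts]
  | cons d ds ih =>
    intro st
    simp only [List.foldl_cons]
    rw [ih]
    by_cases hd : PySem.Dict.get? (PySem.Dict.mk d) "disclosure_type" == some "family_history"
    · simp [fhUpdate, hd, fhParts, fhG1, fhG2, fhG3, fhG4, Bool.or_assoc]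
    · simp [fhUpdate, hd, fhParts]

theorem fh_any_or (l : List String) (f g : String → Bool) :
    (l.any f || l.any g) = l.any (fun t => f t || g t) := by
  apply Bool.eq_iff_iff.2
  simp [List.any_eq_true]
  constructor
  · rintro (⟨p, hp, h⟩ | ⟨p, hp, h⟩) <;> exact ⟨p, hp, by simp [h]⟩
  · rintro ⟨p, hp, h | h⟩
    · exact Or.inl ⟨p, hp, h⟩
    · exact Or.inr ⟨p, hp, h⟩

-- ===== VERDICT (by name: the statement is the Claim_ definition above) =====
theorem extract_family_history_flags_spec : Claim_equal_extract_family_history_flags := by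
  intro ds _
  show extract_family_history_flags ds = extract_family_history_flags_alt ds
  simp only [extract_family_history_flags, extract_family_history_flags_alt]
  rw [fh_foldl]
  simp only [List.any_cons, List.any_nil, Bool.or_false, Bool.false_or]
  rw [fh_isIn_join "cardiac" _ (by decide) (by decide),
      fh_isIn_join "heart" _ (by decide) (by decide),
      fh_isIn_join "coronary" _ (by decide) (by decide),
      fh_isIn_join "diabetes" _ (by decide) (by decide),
      fh_isIn_join "cancer" _ (by decide) (by decide),
      fh_isIn_join "malignant" _ (by decide) (by decide),
      fh_isIn_join "stroke" _ (by decide) (by decide)]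
  rw [fh_any_or, fh_any_or, fh_any_or]
  simp [fhParts, fhG1, fhG2, fhG3, fhG4, Bool.or_assoc]
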